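-- pv_equiv track=rewrite | github.com/Ewha-Summar/server | main/summarize.py | ranked_words
-- ===== SOURCE A (Python) =====
-- def ranked_words(tokenized_data, scores, n=100):
--     top_scores = sorted(((scores[i], s)
--                          for i, s in enumerate(tokenized_data)),
--                         reverse=True)
--     top_n_sentences = []
--     for score, word in top_scores:
--         if word not in top_n_sentences:
--             top_n_sentences.append(word)
--     return " ".join(top_n_sentences)
-- ===== SOURCE B (Python) =====
-- def ranked_words(tokenized_data, scores, n=100):
--     best = {}
--     for i, w in enumerate(tokenized_data):
--         s = scores[i]
--         if w not in best or s > best[w]: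
--             best[w] = s
--     return " ".join(sorted(best, key=lambda w: (best[w], w), reverse=True))
-- ===== Notes on version B (the rewrite author's own statement) =====
-- stated objective: faster
-- what changed: Instead of sorting all (score, word) pairs and then deduplicating with a quadratic 'word not in list' scan, B aggregates a word -> max-score dict in one pass and sorts only the distinct words by (max score, word) descending.
import Mathlib
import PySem

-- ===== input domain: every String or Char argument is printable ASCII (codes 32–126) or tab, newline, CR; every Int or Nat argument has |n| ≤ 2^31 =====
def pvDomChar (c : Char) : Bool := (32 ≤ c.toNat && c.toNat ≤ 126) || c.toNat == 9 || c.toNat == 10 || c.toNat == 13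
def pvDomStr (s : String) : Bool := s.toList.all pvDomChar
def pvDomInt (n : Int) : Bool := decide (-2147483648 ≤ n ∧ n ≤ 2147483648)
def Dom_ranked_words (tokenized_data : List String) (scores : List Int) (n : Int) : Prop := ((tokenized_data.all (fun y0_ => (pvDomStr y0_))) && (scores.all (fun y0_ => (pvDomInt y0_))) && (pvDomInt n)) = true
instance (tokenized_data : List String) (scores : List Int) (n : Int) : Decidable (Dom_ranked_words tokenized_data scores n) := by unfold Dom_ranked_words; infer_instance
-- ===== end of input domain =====

-- B replaces A's sort-all-pairs-then-list-membership-dedup with a one-pass word→max-score dict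
-- followed by a sort of the distinct words only (objective: faster); return values agree on Pre_.

-- ===== PORT A =====
def ranked_words (tokenized_data : List String) (scores : List Int) (n : Int) : String :=
  let top_scores := PySem.List.sorted2
    ((PySem.List.enumerate tokenized_data 0).map (fun is => (PySem.List.pyGetD scores is.1 0, is.2)))
    (fun p => p.1) (fun p => p.2) true
  let top_n_sentences := top_scores.foldl
    (fun acc p => if acc.contains p.2 then acc else acc ++ [p.2]) []
  PySem.Str.join " " top_n_sentences

-- ===== PORT B =====
def ranked_words_alt (tokenized_data : List String) (scores : List Int) (n : Int) : String :=
  let best := (PySem.List.enumerate tokenized_data 0).foldl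
    (fun d iw =>
      let s := PySem.List.pyGetD scores iw.1 0
      match d.get? iw.2 with   -- 'if w not in best or s > best[w]: best[w] = s'
      | none => d.insert iw.2 s
      | some v => if s > v then d.insert iw.2 s else d)
    PySem.Dict.empty
  -- best[w] in the sort key: every sorted w is a key of best, so getD's default is never read
  PySem.Str.join " " (PySem.List.sorted2 best.keys (fun w => best.getD w 0) (fun w => w) true)

-- ===== PRECONDITION & SPEC =====
-- Pre_ excludes exactly the inputs where scores[i] raises IndexError (both A and B read scores[i] for every i)
def Pre_ranked_words (tokenized_data : List String) (scores : List Int) (n : Int) : Prop :=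
  tokenized_data.length ≤ scores.length
instance (tokenized_data : List String) (scores : List Int) (n : Int) : Decidable (Pre_ranked_words tokenized_data scores n) := by unfold Pre_ranked_words; infer_instance
def pvWitness_ranked_words : List String × List Int × Int := (["b", "a", "b"], [1, 3, 2], 100)
def Spec_ranked_words (tokenized_data : List String) (scores : List Int) (n : Int) (out : String) : Prop := out = ranked_words_alt tokenized_data scores n
instance (tokenized_data : List String) (scores : List Int) (n : Int) (out : String) : Decidable (Spec_ranked_words tokenized_data scores n out) := by unfold Spec_ranked_words; infer_instance

-- ===== CLAIM (what is proved, stated in full; the proofs are below) =====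
def Claim_equal_ranked_words : Prop := ∀ (tokenized_data : List String) (scores : List Int) (n : Int), Dom_ranked_words tokenized_data scores n → Pre_ranked_words tokenized_data scores n → Spec_ranked_words tokenized_data scores n (ranked_words tokenized_data scores n)

-- ===== LEMMAS AND PROOFS =====

-- B's dict-building step, rebased onto (score, word) pairs
def pvStep (d : PySem.Dict String Int) (p : Int × String) : PySem.Dict String Int :=
  match d.get? p.2 with
  | none => d.insert p.2 p.1
  | some v => if p.1 > v then d.insert p.2 p.1 else d

-- max score attached to word w in a pair list (meaningful when w occurs)
def pvM (T : List (Int × String)) (w : String) : Int :=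
  (((T.filter (fun p => p.2 == w)).map (fun p => p.1)).max?).getD 0

def pvCombine (o m : Option Int) : Option Int :=
  match o, m with
  | none, none => none
  | some a, none => some a
  | none, some b => some b
  | some a, some b => some (max a b)

-- Python's two-component tuple sort is the lexicographic single-key sort
lemma pv_sorted2_eq_sorted_toLex {α : Type} (xs : List α) (k1 : α → Int) (k2 : α → String) :
    PySem.List.sorted2 xs k1 k2 true
      = PySem.List.sorted xs (fun a => toLex (k1 a, k2 a)) true := by
  rw [PySem.List.sorted_rev_eq_foldl_insertBy]
  show List.foldl _ [] xs = _
  congr 1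
  funext acc x
  congr 1
  funext a b
  simp only [Prod.Lex.lt_iff, ofLex_toLex]
  by_cases h1 : k1 b < k1 a <;> by_cases h2 : k1 a < k1 b <;> by_cases h3 : k2 b < k2 a <;>
    simp [h1, h2, h3] <;> omega

lemma pv_keys_step (d : PySem.Dict String Int) (p : Int × String) :
    (pvStep d p).keys = PySem.Set.add d.keys p.2 := by
  unfold pvStep
  cases h : d.get? p.2 with
  | none =>
      have hn : p.2 ∉ d.keys := by
        rw [← PySem.Dict.get?_eq_none_iff_not_mem_keys]; exact h
      have hc : d.contains p.2 = false := by
        rcases Bool.eq_false_or_eq_true (d.contains p.2) with h'' | h''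
        · exact absurd ((PySem.Dict.contains_iff_mem_keys d p.2).mp h'') hn
        · exact h''
      rw [PySem.Dict.keys_insert_of_not_contains d p.1 hc,
          PySem.Set.add_of_not_mem hn]
  | some v =>
      have hm : p.2 ∈ d.keys := by
        by_contra hm
        rw [← PySem.Dict.get?_eq_none_iff_not_mem_keys] at hm
        simp [hm] at h
      have hc : d.contains p.2 = true := (PySem.Dict.contains_iff_mem_keys d p.2).mpr hm
      rw [PySem.Set.add_of_mem hm]
      split
      · exact PySem.Dict.keys_insert_of_contains d p.1 hc
      · split
        · exact PySem.Dict.keys_insert_of_contains d p.1 hc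
        · rfl

lemma pv_keys_fold (l : List (Int × String)) :
    (l.foldl pvStep PySem.Dict.empty).keys = PySem.Set.ofList (l.map (fun p => p.2)) := by
  have h : ∀ (l : List (Int × String)) (d : PySem.Dict String Int),
      (l.foldl pvStep d).keys = PySem.Set.update d.keys (l.map (fun p => p.2)) := by
    intro l
    induction l with
    | nil => intro d; simp [PySem.Set.update_nil]
    | cons p t ih =>
        intro d
        simp only [List.foldl_cons, List.map_cons, PySem.Set.update_cons, ih, pv_keys_step]
  rw [h, PySem.Dict.keys_empty, PySem.Set.update_nil_left]

lemma pv_get?_step_ne (d : PySem.Dict String Int) (p : Int × String) (v : String) (h : ¬ p.2 = v) :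
    (pvStep d p).get? v = d.get? v := by
  unfold pvStep
  cases hd : d.get? p.2 with
  | none => exact PySem.Dict.get?_insert_of_ne d p.1 (fun he => h he.symm)
  | some a =>
      split
      · exact PySem.Dict.get?_insert_of_ne d p.1 (fun he => h he.symm)
      · split
        · exact PySem.Dict.get?_insert_of_ne d p.1 (fun he => h he.symm)
        · rfl

lemma pv_get?_fold (l : List (Int × String)) (d : PySem.Dict String Int) (v : String) :
    (l.foldl pvStep d).get? v
      = pvCombine (d.get? v) (((l.filter (fun p => p.2 == v)).map (fun p => p.1)).max?) := by
  induction l generalizing d with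
  | nil => cases h : d.get? v <;> simp [pvCombine, h]
  | cons p t ih =>
      simp only [List.foldl_cons]
      rw [ih]
      by_cases hpv : p.2 = v
      · have hfil : (p :: t).filter (fun p => p.2 == v) = p :: t.filter (fun p => p.2 == v) := by
          simp [hpv]
        rw [hfil]
        simp only [List.map_cons, List.max?_cons]
        have hget : (pvStep d p).get? v = some (((d.get? v).elim p.1 (fun a => max a p.1))) := by
          unfold pvStep
          rw [hpv]
          cases hd : d.get? v with
          | none => simp [PySem.Dict.get?_insert_self]
          | some a =>
              simp only [Option.elim]
              split
              · rw [PySem.Dict.get?_insert_self]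
                congr 1
                omega
              · rw [hd]
                congr 1
                omega
        rw [hget]
        cases hd : d.get? v <;>
          cases hm : (List.map (fun p => p.1) (t.filter (fun p => p.2 == v))).max? <;>
            simp [pvCombine, Option.elim] <;> omega
      · have hfil : (p :: t).filter (fun p => p.2 == v) = t.filter (fun p => p.2 == v) := by
          simp [hpv]
        rw [hfil, pv_get?_step_ne d p v hpv]

lemma pv_getD_fold_of_mem (l : List (Int × String)) (v : String) (hv : v ∈ l.map (fun p => p.2)) :
    (l.foldl pvStep PySem.Dict.empty).getD v 0 = pvM l v := by
  have hne : (l.filter (fun p => p.2 == v)).map (fun p => p.1) ≠ [] := by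
    rcases List.mem_map.mp hv with ⟨q, hq, hq2⟩
    have : q ∈ l.filter (fun p => p.2 == v) := by
      rw [List.mem_filter]; exact ⟨hq, by simp [hq2]⟩
    intro hnil
    exact absurd (List.mem_map_of_mem this (f := fun p => p.1)) (by simp [hnil])
  cases hm : ((l.filter (fun p => p.2 == v)).map (fun p => p.1)).max? with
  | none => exact absurd (List.max?_eq_none_iff.mp hm) hne
  | some m =>
      rw [PySem.Dict.getD_eq_get?_getD, pv_get?_fold, PySem.Dict.get?_empty, hm]
      simp [pvCombine, pvM, hm]

lemma pv_max?_perm {l l' : List Int} (h : l.Perm l') : l.max? = l'.max? := by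
  cases hm : l.max? with
  | none =>
      have hl : l = [] := List.max?_eq_none_iff.mp hm
      symm
      rw [List.max?_eq_none_iff]
      exact ((hl ▸ h).nil_eq).symm
  | some m =>
      symm
      rw [List.max?_eq_some_iff] at hm ⊢
      exact ⟨h.mem_iff.mp hm.1, fun b hb => hm.2 b (h.mem_iff.mpr hb)⟩

lemma pvM_perm {T T' : List (Int × String)} (h : T.Perm T') (v : String) : pvM T v = pvM T' v := by
  unfold pvM
  rw [pv_max?_perm ((h.filter _).map _)]

lemma pvM_mem {T : List (Int × String)} {v : String} (hv : v ∈ T.map (fun p => p.2)) :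
    (pvM T v, v) ∈ T := by
  have hne : (T.filter (fun p => p.2 == v)).map (fun p => p.1) ≠ [] := by
    rcases List.mem_map.mp hv with ⟨q, hq, hq2⟩
    have : q ∈ T.filter (fun p => p.2 == v) := by
      rw [List.mem_filter]; exact ⟨hq, by simp [hq2]⟩
    intro hnil
    exact absurd (List.mem_map_of_mem this (f := fun p => p.1)) (by simp [hnil])
  cases hm : ((T.filter (fun p => p.2 == v)).map (fun p => p.1)).max? with
  | none => exact absurd (List.max?_eq_none_iff.mp hm) hne
  | some m =>
      have hmem := (List.max?_eq_some_iff.mp hm).1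
      rcases List.mem_map.mp hmem with ⟨q, hq, hq1⟩
      rw [List.mem_filter] at hq
      have hq2 : q.2 = v := by simpa using hq.2
      have : pvM T v = m := by simp [pvM, hm]
      rw [this, ← hq1, ← hq2]
      exact hq.1

lemma pvM_cons_ne (p : Int × String) (T : List (Int × String)) (v : String) (h : ¬ p.2 = v) :
    pvM (p :: T) v = pvM T v := by
  unfold pvM
  simp [List.filter_cons, h]

lemma pvM_cons_self_ge (p : Int × String) (T : List (Int × String)) :
    p.1 ≤ pvM (p :: T) p.2 := by
  unfold pvM
  rw [List.filter_cons]
  simp only [beq_self_eq_true, if_pos]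
  rw [List.map_cons, List.max?_cons]
  cases hm : (List.map (fun p => p.1) (T.filter (fun q => q.2 == p.2))).max? <;>
    simp [Option.elim, hm]

-- heart of the equivalence: the ordered dedup of the words of a lex-descending pair list
-- is strictly descending in (max score of the word, word)
lemma pv_core (T : List (Int × String))
    (h : T.Pairwise (fun a b => toLex (b.1, b.2) ≤ toLex (a.1, a.2))) :
    (PySem.Set.ofList (T.map (fun p => p.2))).Pairwise
      (fun a b => toLex (pvM T b, b) < toLex (pvM T a, a)) := by
  induction T with
  | nil => simp [PySem.Set.ofList_nil]
  | cons p T ih =>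
      rcases List.pairwise_cons.mp h with ⟨hhead, htail⟩
      rw [List.map_cons, PySem.Set.ofList_cons]
      rw [List.pairwise_cons]
      constructor
      · intro b hb
        rcases (PySem.Set.mem_discard _ _ _).mp hb with ⟨hb1, hbne⟩
        have hbT : b ∈ T.map (fun p => p.2) := (PySem.Set.mem_ofList _ _).mp hb1
        rw [pvM_cons_ne p T b (fun he => hbne he.symm)]
        have hmem := pvM_mem hbT
        have hle : toLex ((pvM T b, b).1, (pvM T b, b).2) ≤ toLex (p.1, p.2) := hhead _ hmem
        simp only at hle
        have hlt : toLex ((pvM T b : Int), b) < toLex (p.1, p.2) := by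
          apply lt_of_le_of_ne hle
          intro he
          apply hbne
          exact congrArg Prod.snd (toLex_inj.mp he)
        apply lt_of_lt_of_le hlt
        rw [Prod.Lex.le_iff]
        rcases lt_or_eq_of_le (pvM_cons_self_ge p T) with h' | h'
        · left; simpa using h'
        · right; simp [h']
      · have hpt := ih htail
        have hfil := hpt.filter (fun y => !(y == p.2))
        apply hfil.imp_of_mem
        intro a b ha hb hR
        have ha' : a ≠ p.2 := by
          have := List.of_mem_filter ha; simpa using this
        have hb' : b ≠ p.2 := by
          have := List.of_mem_filter hb; simpa using this
        rw [pvM_cons_ne p T a (fun he => ha' he.symm), pvM_cons_ne p T b (fun he => hb' he.symm)]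
        exact hR

-- ===== VERDICT (by name: the statement is the Claim_ definition above) =====
theorem ranked_words_spec : Claim_equal_ranked_words := by
  intro tokenized_data scores n _hdom _hpre
  show ranked_words tokenized_data scores n = ranked_words_alt tokenized_data scores n
  unfold ranked_words ranked_words_alt
  set pairs : List (Int × String) :=
    (PySem.List.enumerate tokenized_data 0).map (fun is => (PySem.List.pyGetD scores is.1 0, is.2))
    with hpairs
  set T : List (Int × String) := PySem.List.sorted pairs (fun p => toLex (p.1, p.2)) true with hT
  set best : PySem.Dict String Int := pairs.foldl pvStep PySem.Dict.empty with hbest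
  -- B's dict fold is the fold of pvStep over pairs
  have hfold : (PySem.List.enumerate tokenized_data 0).foldl
      (fun d iw =>
        let s := PySem.List.pyGetD scores iw.1 0
        match d.get? iw.2 with
        | none => d.insert iw.2 s
        | some v => if s > v then d.insert iw.2 s else d)
      PySem.Dict.empty = best := by
    rw [hbest, hpairs, List.foldl_map]
    rfl
  rw [hfold]
  -- A's sorted2 is the lexicographic sort, its dedup loop is Set.ofList of the words
  simp only [pv_sorted2_eq_sorted_toLex]
  rw [← hT]
  have hA : T.foldl (fun acc p => if acc.contains p.2 then acc else acc ++ [p.2]) []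
      = PySem.Set.ofList (T.map (fun p => p.2)) := by
    rw [PySem.Set.ofList_eq_foldl, List.foldl_map]
    rfl
  rw [hA]
  set W : List String := PySem.Set.ofList (T.map (fun p => p.2)) with hW
  have hTperm : T.Perm pairs := PySem.List.sorted_perm pairs _ true
  have hmemW : ∀ a, a ∈ W ↔ a ∈ pairs.map (fun p => p.2) := by
    intro a
    rw [hW, PySem.Set.mem_ofList]
    exact (hTperm.map (fun p => p.2)).mem_iff
  have hkeys : best.keys = PySem.Set.ofList (pairs.map (fun p => p.2)) := pv_keys_fold pairs
  have hgetD : ∀ a ∈ W, best.getD a 0 = pvM T a := by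
    intro a ha
    rw [hbest, pv_getD_fold_of_mem pairs a ((hmemW a).mp ha)]
    exact (pvM_perm hTperm a).symm
  have hperm : W.Perm best.keys := by
    rw [(List.perm_ext_iff_of_nodup (PySem.Set.nodup_ofList _) (hkeys ▸ PySem.Set.nodup_ofList _))]
    intro a
    rw [hkeys]
    exact (hmemW a).trans (PySem.Set.mem_ofList _ _).symm
  have hpair : W.Pairwise (fun a b => toLex (best.getD b 0, b) < toLex (best.getD a 0, a)) := by
    have hc := pv_core T (PySem.List.sorted_pairwise_rev pairs (fun p => toLex (p.1, p.2)))
    apply hc.imp_of_mem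
    intro a b ha hb hR
    rw [hgetD a ha, hgetD b hb]
    exact hR
  rw [PySem.List.sorted_rev_eq_of_perm_of_pairwise_gt best.keys W
        (fun w => toLex (best.getD w 0, w)) hperm hpair]
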